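-- pv_equiv track=rewrite | github.com/daniel-reich/ubiquitous-fiesta | H2EyqacEnijCozCWs_9.py | first_n_vowels
-- ===== SOURCE A (Python) =====
-- def first_n_vowels(txt, n):
--   r = ''
--   for ch in txt:
--     if n == 0:
--       break;
--     if ch in 'aeiou':
--       r += ch
--       n -= 1
--   if n != 0:
--     return "invalid"
--   return r
-- ===== SOURCE B (Python) =====
-- def first_n_vowels(txt, n):
--   vowels = [c for c in txt if c in 'aeiou']
--   if n < 0 or len(vowels) < n:
--     return "invalid"
--   return ''.join(vowels[:n])
-- ===== Notes on version B (the rewrite author's own statement) =====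
-- stated objective: simpler
-- what changed: Replaces the counter-and-break scan with collect-all-vowels-then-branch-on-count-then-slice; the negative-n and not-enough-vowels cases fall out of one arithmetic test instead of leftover loop state.
import Mathlib
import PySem

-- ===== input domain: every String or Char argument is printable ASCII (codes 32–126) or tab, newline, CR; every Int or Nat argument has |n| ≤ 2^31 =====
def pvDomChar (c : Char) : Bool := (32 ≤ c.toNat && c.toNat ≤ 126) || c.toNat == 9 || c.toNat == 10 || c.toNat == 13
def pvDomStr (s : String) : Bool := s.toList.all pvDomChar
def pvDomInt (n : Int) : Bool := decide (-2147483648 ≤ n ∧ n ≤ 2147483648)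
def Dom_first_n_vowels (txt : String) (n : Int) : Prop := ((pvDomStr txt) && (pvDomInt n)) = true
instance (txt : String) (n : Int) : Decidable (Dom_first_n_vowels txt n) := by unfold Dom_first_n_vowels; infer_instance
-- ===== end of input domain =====

-- B replaces A's counter-and-break scan with collect-all-vowels, branch on the count, then slice (simpler decomposition; same cost).


-- ===== PORT A =====
-- 'ch in "aeiou"' (used by both Pythons)
def pvIsVowel (c : Char) : Bool := ['a','e','i','o','u'].contains c

-- the for-loop of A with its break: state (r, n); r kept as List Char, turned into a String at the end
def pvLoopA : List Char → List Char → Int → List Char × Int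
  | [], r, n => (r, n)
  | ch :: rest, r, n =>
    if n = 0 then (r, n)
    else if pvIsVowel ch then pvLoopA rest (r ++ [ch]) (n - 1)
    else pvLoopA rest r n

def first_n_vowels (txt : String) (n : Int) : String :=
  let (r, n') := pvLoopA txt.toList [] n
  if n' ≠ 0 then "invalid" else String.ofList r

-- ===== PORT B =====
def first_n_vowels_alt (txt : String) (n : Int) : String :=
  let vowels := txt.toList.filter pvIsVowel
  if n < 0 ∨ (vowels.length : Int) < n then "invalid"
  else String.ofList (vowels.take n.toNat)   -- vowels[:n] joined; n ≥ 0 here so [:n] is take n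

-- ===== PRECONDITION & SPEC =====
def Spec_first_n_vowels (txt : String) (n : Int) (out : String) : Prop := out = first_n_vowels_alt txt n
instance (txt : String) (n : Int) (out : String) : Decidable (Spec_first_n_vowels txt n out) := by unfold Spec_first_n_vowels; infer_instance

-- ===== CLAIM (what is proved, stated in full; the proofs are below) =====
def Claim_equal_first_n_vowels : Prop := ∀ (txt : String) (n : Int), Dom_first_n_vowels txt n → Spec_first_n_vowels txt n (first_n_vowels txt n)

-- ===== LEMMAS AND PROOFS =====

-- Characterisation of A's loop: it appends the vowels of cs until the counter hits 0.
lemma pvLoopA_eq (cs : List Char) : ∀ (r : List Char) (n : Int),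
    pvLoopA cs r n =
      if n < 0 ∨ ((cs.filter pvIsVowel).length : Int) < n then
        (r ++ cs.filter pvIsVowel, n - (cs.filter pvIsVowel).length)
      else (r ++ (cs.filter pvIsVowel).take n.toNat, 0) := by
  induction cs with
  | nil =>
    intro r n
    simp only [pvLoopA, List.filter_nil, List.length_nil, List.take_nil, List.append_nil]
    split_ifs with h
    · simp
    · have : n = 0 := by omega
      simp [this]
  | cons ch rest ih =>
    intro r n
    by_cases hn : n = 0
    · subst hn
      simp [pvLoopA]
    · by_cases hv : pvIsVowel ch
      · simp only [pvLoopA, if_neg hn, if_pos hv, ih, List.filter_cons_of_pos hv,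
          List.length_cons]
        have hcast : (((rest.filter pvIsVowel).length + 1 : Nat) : Int)
            = ((rest.filter pvIsVowel).length : Int) + 1 := by push_cast; ring
        by_cases h1 : n - 1 < 0 ∨ ((rest.filter pvIsVowel).length : Int) < n - 1
        · rw [if_pos h1, if_pos (by omega)]
          simp only [List.append_assoc, List.singleton_append, hcast, Prod.mk.injEq, true_and]
          omega
        · rw [if_neg h1, if_neg (by omega)]
          have hnpos : 0 < n := by omega
          have htn : n.toNat = (n - 1).toNat + 1 := by omega
          rw [htn, List.take_succ_cons, List.append_assoc]
          rfl
      · simp only [pvLoopA, if_neg hn, if_neg hv, ih, List.filter_cons_of_neg hv]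

-- ===== VERDICT (by name: the statement is the Claim_ definition above) =====
theorem first_n_vowels_spec : Claim_equal_first_n_vowels := by
  intro txt n _
  unfold Spec_first_n_vowels first_n_vowels first_n_vowels_alt
  rw [pvLoopA_eq]
  by_cases h : n < 0 ∨ ((txt.toList.filter pvIsVowel).length : Int) < n
  · rw [if_pos h]
    simp only []
    rw [if_pos (by omega), if_pos h]
  · rw [if_neg h]
    simp only []
    rw [if_neg (by omega), if_neg h]
    simp
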